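-- pv_equiv track=rewrite | github.com/LuisBaltazarS/examenTecnicoSoyCalidad | PruebaTecnicaEjercicio1.py | ejercicio1
-- ===== SOURCE A (Python) =====
-- def ejercicio1(matriz):
--
--     valores_sin_repeticiones = []
--     valores_completos = []
--
--     # Recorrer la matriz para crear una lista con todos los valores que contienen, sin repeticiones y tambien agregamos otra lista para tomar todos los valores
--
--     # Obtenemos las listas
--     for a in matriz:
--         # Obtenemos los valores de la listas
--         for b in a:
--             # Agregamos los valores a la lista "valores_sin_repeticiones"
--             valores_sin_repeticiones.append(b)
--             # Agregamos todos los valores a la lista "valores_completos"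
--             valores_completos.append(b)
--
--     # Borramos valores duplicados de la lista "valores_sin_repeticiones"
--     valores_sin_repeticiones = list(set(valores_sin_repeticiones))
--
--     # Creamos las variables requeridas
--     repiten_una_vez = 0
--     repiten_mas_de_dos = 0
--
--     # Recorremos la lista "valores_sin_repeticiones"
--     for i in valores_sin_repeticiones:
--         # Usamos count para verificar cuanto se repite cada elemento en la lista "valores_completos"
--         cant = valores_completos.count(i)
--
--         # Armamos la logica para obtener lo que se requiere
--         if( cant == 1 ):
--             repiten_una_vez += 1
--         elif( cant >= 2):
--             repiten_mas_de_dos += 1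
--
--     return [ repiten_una_vez, repiten_mas_de_dos ]
-- ===== SOURCE B (Python) =====
-- def ejercicio1(matriz):
--     # Sort the flattened matrix, then scan it once grouping equal consecutive
--     # values; each run of length 1 is a value seen once, longer runs are repeats.
--     plano = sorted(v for fila in matriz for v in fila)
--     repiten_una_vez = 0
--     repiten_mas_de_dos = 0
--     i = 0
--     n = len(plano)
--     while i < n:
--         j = i + 1
--         while j < n and plano[j] == plano[i]:
--             j += 1
--         if j - i == 1:
--             repiten_una_vez += 1
--         else:
--             repiten_mas_de_dos += 1
--         i = j
--     return [repiten_una_vez, repiten_mas_de_dos]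
-- ===== Notes on version B (the rewrite author's own statement) =====
-- stated objective: faster
-- what changed: Replaces A's set construction plus a repeated .count() scan per distinct value with sort-then-single-scan: the flattened matrix is sorted and traversed once, classifying each maximal run of equal values by its length.
import Mathlib
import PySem

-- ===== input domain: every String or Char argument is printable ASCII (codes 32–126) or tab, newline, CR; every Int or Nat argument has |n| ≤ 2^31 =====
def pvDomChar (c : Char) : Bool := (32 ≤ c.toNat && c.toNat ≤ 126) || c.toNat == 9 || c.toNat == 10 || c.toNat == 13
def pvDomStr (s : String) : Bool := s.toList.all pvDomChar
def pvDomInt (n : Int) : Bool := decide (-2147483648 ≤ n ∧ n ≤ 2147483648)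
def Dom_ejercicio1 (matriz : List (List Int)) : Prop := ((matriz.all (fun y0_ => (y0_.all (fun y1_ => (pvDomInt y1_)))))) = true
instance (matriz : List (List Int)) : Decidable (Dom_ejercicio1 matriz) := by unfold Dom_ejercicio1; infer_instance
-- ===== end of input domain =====

-- B sorts the flattened matrix and classifies maximal runs of equal values in one scan
-- (faster: sort + single pass instead of A's per-distinct-value rescans of the whole list).

-- ===== PORT A =====
def ejercicio1 (matriz : List (List Int)) : List Int :=
  let p : List Int × List Int :=
    matriz.foldl (fun acc a =>
      a.foldl (fun acc b => (acc.1 ++ [b], acc.2 ++ [b])) acc) ([], [])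
  let valores_sin_repeticiones : PySem.Set Int := PySem.Set.ofList p.1
  let valores_completos : List Int := p.2
  let s : Int × Int :=
    valores_sin_repeticiones.foldl (fun s i =>
      let cant : Int := (valores_completos.count i : Int)
      if cant == 1 then (s.1 + 1, s.2)
      else if 2 ≤ cant then (s.1, s.2 + 1)
      else s) (0, 0)
  [s.1, s.2]

-- ===== PORT B =====
-- the outer while loop: consume one maximal run of equal values per step, keeping the two counters
def pvRunScan : List Int → Int → Int → Int × Int
  | [], una, mas => (una, mas)
  | x :: xs, una, mas =>
    -- inner while loop: j advances past the run of values equal to plano[i]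
    let run : Nat := (xs.takeWhile (fun y => y == x)).length + 1
    if run == 1 then pvRunScan (xs.dropWhile (fun y => y == x)) (una + 1) mas
    else pvRunScan (xs.dropWhile (fun y => y == x)) una (mas + 1)
termination_by l => l.length
decreasing_by
  all_goals
    simp only [List.length_cons]
    exact Nat.lt_succ_of_le (List.length_dropWhile_le _ _)

def ejercicio1_alt (matriz : List (List Int)) : List Int :=
  let plano : List Int := PySem.List.sorted (matriz.flatten) (fun v => v) false
  let r : Int × Int := pvRunScan plano 0 0
  [r.1, r.2]

-- ===== PRECONDITION & SPEC =====
def Spec_ejercicio1 (matriz : List (List Int)) (out : List Int) : Prop := out = ejercicio1_alt matriz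
instance (matriz : List (List Int)) (out : List Int) : Decidable (Spec_ejercicio1 matriz out) := by unfold Spec_ejercicio1; infer_instance

-- ===== CLAIM (what is proved, stated in full; the proofs are below) =====
def Claim_equal_ejercicio1 : Prop := ∀ (matriz : List (List Int)), Dom_ejercicio1 matriz → Spec_ejercicio1 matriz (ejercicio1 matriz)

-- ===== LEMMAS AND PROOFS =====
-- Shared closed form: for distinct values of l, how many occur exactly once / at least twice.
def pvCF (l : List Int) : Int × Int :=
  ((((PySem.Set.ofList l).countP (fun v => (l.count v : Int) == 1) : Nat) : Int),
   (((PySem.Set.ofList l).countP (fun v => decide (2 ≤ (l.count v : Int))) : Nat) : Int))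

theorem ejercicio1_eq (matriz : List (List Int)) :
    ejercicio1 matriz = [(pvCF matriz.flatten).1, (pvCF matriz.flatten).2] := by
  simp only [pvCF]
  unfold ejercicio1
  rw [← List.foldl_flatten,
      PySem.List.foldl_prod_mk (f := fun acc b => acc ++ [b]) (g := fun acc b => acc ++ [b]),
      PySem.List.foldl_append_singleton]
  simp only [List.nil_append]
  rw [PySem.List.foldl_congr_mem _ _
      (fun s i =>
        ((if ((matriz.flatten.count i : Int) == 1) then s.1 + 1 else s.1),
         (if (!((matriz.flatten.count i : Int) == 1) && decide (2 ≤ (matriz.flatten.count i : Int))) then s.2 + 1 else s.2)))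
      _ ?_]
  · rw [PySem.List.foldl_prod_mk
        (f := fun acc i => if ((matriz.flatten.count i : Int) == 1) then acc + 1 else acc)
        (g := fun acc i => if (!((matriz.flatten.count i : Int) == 1) && decide (2 ≤ (matriz.flatten.count i : Int))) then acc + 1 else acc),
      PySem.List.foldl_if_add_one, PySem.List.foldl_if_add_one]
    simp only [zero_add, List.cons.injEq, and_true]
    refine ⟨trivial, ?_⟩
    congr 1
    apply List.countP_congr
    intro x _
    by_cases h : (matriz.flatten.count x : Int) = 1 <;> simp [h]
  · intro acc x _
    simp only
    by_cases h1 : ((matriz.flatten.count x : Int) == 1)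
    · simp [h1]
    · by_cases h2 : (2 ≤ (matriz.flatten.count x : Int)) <;> simp [h1, h2]

theorem pv_not_mem_dropWhile (x : Int) : ∀ xs : List Int, (x :: xs).Pairwise (· ≤ ·) →
    x ∉ xs.dropWhile (fun y => y == x)
  | [], _, hx => by simp at hx
  | y :: ys, h, hx => by
    rcases List.pairwise_cons.mp h with ⟨hxall, hys⟩
    by_cases hy : (y == x) = true
    · have hx' : x ∉ ys.dropWhile (fun y => y == x) :=
        pv_not_mem_dropWhile x ys (List.pairwise_cons.mpr
          ⟨fun z hz => hxall z (List.mem_cons_of_mem _ hz), (List.pairwise_cons.mp hys).2⟩)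
      simp only [List.dropWhile_cons, hy, if_true] at hx
      exact hx' hx
    · simp only [List.dropWhile_cons, hy] at hx
      rcases List.mem_cons.mp hx with h1 | h2
      · exact hy (by simp [h1])
      · have hyx : y ≤ x := (List.pairwise_cons.mp hys).1 x h2
        have hxy : x ≤ y := hxall y (List.mem_cons_self ..)
        exact hy (by simp [le_antisymm hyx hxy])

theorem pv_count_all_eq (x : Int) : ∀ t : List Int, (∀ y ∈ t, y = x) → t.count x = t.length
  | [], _ => rfl
  | y :: ys, h => by
    have hy : y = x := h y (by simp)
    simp [hy, pv_count_all_eq x ys (fun z hz => h z (by simp [hz]))]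

theorem pvCF_run (x : Int) (xs : List Int) (h : (x :: xs).Pairwise (· ≤ ·)) :
    pvCF (x :: xs) =
      (if (xs.takeWhile (fun y => y == x)).length = 0
       then ((pvCF (xs.dropWhile (fun y => y == x))).1 + 1, (pvCF (xs.dropWhile (fun y => y == x))).2)
       else ((pvCF (xs.dropWhile (fun y => y == x))).1, (pvCF (xs.dropWhile (fun y => y == x))).2 + 1)) := by
  set t := xs.takeWhile (fun y => y == x) with htdef
  set d := xs.dropWhile (fun y => y == x) with hddef
  have htd : t ++ d = xs := List.takeWhile_append_dropWhile
  have ht : ∀ y ∈ t, y = x := fun y hy => by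
    have := List.mem_takeWhile_imp hy; simpa using this
  have hxd : x ∉ d := pv_not_mem_dropWhile x xs h
  -- counts in x :: xs
  have hcx : (x :: xs).count x = t.length + 1 := by
    rw [List.count_cons_self, ← htd, List.count_append,
        pv_count_all_eq x t ht, List.count_eq_zero.mpr hxd]
  have hcne : ∀ v : Int, v ≠ x → (x :: xs).count v = d.count v := by
    intro v hv
    rw [List.count_cons_of_ne (Ne.symm hv), ← htd, List.count_append,
        List.count_eq_zero.mpr (fun hvt => hv (ht v hvt)), Nat.zero_add]
  -- set(x :: xs) is a permutation of x :: set(d)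
  have hset : (PySem.Set.ofList (x :: xs) : List Int).Perm (x :: (PySem.Set.ofList d : List Int)) := by
    refine (List.perm_ext_iff_of_nodup (PySem.Set.nodup_ofList _) ?_).mpr ?_
    · exact List.nodup_cons.mpr ⟨by simpa [PySem.Set.mem_ofList] using hxd, PySem.Set.nodup_ofList _⟩
    · intro a
      simp only [PySem.Set.mem_ofList, List.mem_cons, ← htd, List.mem_append]
      constructor
      · rintro (rfl | hta | hda)
        · exact Or.inl rfl
        · exact Or.inl (ht a hta)
        · exact Or.inr hda
      · rintro (rfl | hda)
        · exact Or.inl rfl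
        · exact Or.inr (Or.inr hda)
  have hstep : ∀ p : Int → Bool,
      (PySem.Set.ofList (x :: xs) : List Int).countP p
        = ((PySem.Set.ofList d : List Int).countP p + if p x then 1 else 0) := by
    intro p
    rw [hset.countP_eq, List.countP_cons]
  have hmemne : ∀ v ∈ (PySem.Set.ofList d : List Int), v ≠ x := by
    intro v hv hvx
    exact hxd (hvx ▸ (PySem.Set.mem_ofList d v).mp hv)
  have hinner1 : (PySem.Set.ofList d : List Int).countP (fun v => (((x :: xs).count v : Int) == 1))
      = (PySem.Set.ofList d : List Int).countP (fun v => ((d.count v : Int) == 1)) := by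
    apply List.countP_congr
    intro v hv
    rw [hcne v (hmemne v hv)]
  have hinner2 : (PySem.Set.ofList d : List Int).countP (fun v => decide (2 ≤ ((x :: xs).count v : Int)))
      = (PySem.Set.ofList d : List Int).countP (fun v => decide (2 ≤ ((d.count v : Int)))) := by
    apply List.countP_congr
    intro v hv
    rw [hcne v (hmemne v hv)]
  simp only [pvCF]
  rw [hstep (fun v => ((x :: xs).count v : Int) == 1),
      hstep (fun v => decide (2 ≤ ((x :: xs).count v : Int))),
      hinner1, hinner2]
  rw [hcx]
  by_cases h0 : t.length = 0
  · rw [h0]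
    have h1 : ((((0 : Nat) + 1 : Nat) : Int) == 1) = true := by norm_num
    have h2 : decide (2 ≤ (((0 : Nat) + 1 : Nat) : Int)) = false := by norm_num
    simp only [h1, h2, if_true, Bool.false_eq_true, if_false]
    simp
  · have hle : 1 ≤ t.length := Nat.one_le_iff_ne_zero.mpr h0
    have h1 : (((t.length + 1 : Nat) : Int) == 1) = false := by
      rw [beq_eq_false_iff_ne]
      push_cast
      omega
    have h2 : decide (2 ≤ ((t.length + 1 : Nat) : Int)) = true := by
      simp only [decide_eq_true_eq]
      push_cast
      omega
    simp only [h1, h2, if_neg h0, if_true, Bool.false_eq_true, if_false]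
    simp

theorem pvRunScan_sorted_aux : ∀ (n : Nat) (l : List Int), l.length ≤ n → l.Pairwise (· ≤ ·) →
    ∀ una mas : Int, pvRunScan l una mas = (una + (pvCF l).1, mas + (pvCF l).2)
  | _, [], _, _, una, mas => by
    simp [pvRunScan, pvCF, PySem.Set.ofList]
  | 0, x :: xs, hlen, _, _, _ => by simp at hlen
  | n + 1, x :: xs, hlen, h, una, mas => by
    have hdlen : (xs.dropWhile (fun y => y == x)).length ≤ n := by
      have h1 := List.length_dropWhile_le (fun y => y == x) xs
      have h2 : xs.length + 1 ≤ n + 1 := by simpa using hlen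
      omega
    have hdp : (xs.dropWhile (fun y => y == x)).Pairwise (· ≤ ·) :=
      ((List.pairwise_cons.mp h).2).sublist (List.dropWhile_sublist _)
    rw [pvRunScan, pvCF_run x xs h]
    by_cases h0 : (xs.takeWhile (fun y => y == x)).length = 0
    · simp only [h0]
      rw [pvRunScan_sorted_aux n _ hdlen hdp]
      simp [Prod.ext_iff]
      omega
    · have hne : ((xs.takeWhile (fun y => y == x)).length + 1 == 1) = false := by
        rw [beq_eq_false_iff_ne]; omega
      simp only [hne, if_neg h0, Bool.false_eq_true, if_false]
      rw [pvRunScan_sorted_aux n _ hdlen hdp]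
      simp [Prod.ext_iff]
      omega

theorem pvCF_perm (l₁ l₂ : List Int) (h : l₁.Perm l₂) : pvCF l₁ = pvCF l₂ := by
  have hcnt1 : (fun v => ((l₁.count v : Int) == 1)) = (fun v => ((l₂.count v : Int) == 1)) :=
    funext fun v => by rw [h.count_eq]
  have hcnt2 : (fun v => decide (2 ≤ (l₁.count v : Int))) = (fun v => decide (2 ≤ (l₂.count v : Int))) :=
    funext fun v => by rw [h.count_eq]
  have hperm : (PySem.Set.ofList l₁ : List Int).Perm (PySem.Set.ofList l₂) :=
    (List.perm_ext_iff_of_nodup (PySem.Set.nodup_ofList l₁) (PySem.Set.nodup_ofList l₂)).mpr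
      (fun a => by simp [PySem.Set.mem_ofList, h.mem_iff])
  simp only [pvCF, hcnt1, hcnt2, hperm.countP_eq]

theorem ejercicio1_alt_eq (matriz : List (List Int)) :
    ejercicio1_alt matriz = [(pvCF matriz.flatten).1, (pvCF matriz.flatten).2] := by
  have hdef : ejercicio1_alt matriz =
      [(pvRunScan (PySem.List.sorted matriz.flatten (fun v => v) false) 0 0).1,
       (pvRunScan (PySem.List.sorted matriz.flatten (fun v => v) false) 0 0).2] := rfl
  rw [hdef,
      pvRunScan_sorted_aux (PySem.List.sorted matriz.flatten (fun v => v) false).length _ le_rfl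
        (by simpa using PySem.List.sorted_pairwise (xs := matriz.flatten) (key := fun v => v)),
      pvCF_perm _ _ (PySem.List.sorted_perm ..)]
  simp

-- ===== VERDICT (by name: the statement is the Claim_ definition above) =====
theorem ejercicio1_spec : Claim_equal_ejercicio1 := by
  intro matriz _
  unfold Spec_ejercicio1
  rw [ejercicio1_eq, ejercicio1_alt_eq]
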